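-- pv_equiv track=rewrite | github.com/ly4k/Certipy | certipy/lib/certificate.py | dn_to_components
-- ===== SOURCE A (Python) =====
-- from typing import List, Optional, Tuple, Union
--
-- def dn_to_components(dn: str) -> List[Tuple[str, str]]:
--     """
--     Parse a Distinguished Name string into components.
--
--     Args:
--         dn: DN string (e.g., "CN=username,DC=domain,DC=local")
--
--     Returns:
--         List of (attribute_name, value) tuples
--     """
--     components = []
--     component = ""
--     escape_sequence = False
--
--     for c in dn:
--         if c == "\\":
--             escape_sequence = True
--         elif escape_sequence and c != " ":
--             escape_sequence = False
--         elif c == ",":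
--             if "=" in component:
--                 attr_name, _, value = component.partition("=")
--                 component = (attr_name.strip().upper(), value.strip())
--                 components.append(component)
--                 component = ""
--                 continue
--
--         component += c
--
--     # Add the last component
--     attr_name, _, value = component.partition("=")
--     component = (attr_name.strip().upper(), value.strip())
--     components.append(component)
--
--     return components
-- ===== SOURCE B (Python) =====
-- def dn_to_components(dn: str):
--     # A comma splits the DN iff it is not "escaped" and an '=' occurred since the
--     # previous split.  Instead of running A's escape-state machine, use the closed
--     # form: a position is escaped iff the nearest non-space character before it is
--     # a backslash.  Collect raw segments by slicing between split positions, then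
--     # map each through partition/strip/upper.
--     def _escaped(prefix: str) -> bool:
--         return prefix.rstrip(' ').endswith('\\')
--
--     parts = []
--     start = 0
--     for i, c in enumerate(dn):
--         if c == ',' and not _escaped(dn[:i]) and '=' in dn[start:i]:
--             parts.append(dn[start:i])
--             start = i + 1
--     parts.append(dn[start:])
--     return [(a.strip().upper(), v.strip())
--             for a, _, v in (p.partition('=') for p in parts)]
-- ===== Notes on version B (the rewrite author's own statement) =====
-- stated objective: alternative
-- what changed: Replaces A's running escape-state machine and per-character accumulation on a growing string with a closed-form lookbehind predicate (a comma is escaped iff the nearest non-space character before it is a backslash) plus index/slice-based segment extraction, then a staged comprehension maps each raw segment through partition/strip/upper.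
import Mathlib
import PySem

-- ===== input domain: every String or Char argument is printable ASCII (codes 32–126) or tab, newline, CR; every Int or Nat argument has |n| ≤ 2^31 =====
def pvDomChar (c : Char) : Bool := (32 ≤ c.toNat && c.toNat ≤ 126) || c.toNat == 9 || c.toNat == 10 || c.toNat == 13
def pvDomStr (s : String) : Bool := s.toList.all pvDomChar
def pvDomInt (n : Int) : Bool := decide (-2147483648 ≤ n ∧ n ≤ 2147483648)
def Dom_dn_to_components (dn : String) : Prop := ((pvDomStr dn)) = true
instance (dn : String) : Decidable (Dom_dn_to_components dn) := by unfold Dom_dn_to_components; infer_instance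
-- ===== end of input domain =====

-- B replaces A's running escape-state machine and character accumulation by a closed-form
-- lookbehind predicate (a comma is escaped iff the nearest non-space char before it is a
-- backslash) and index/slice-based segment extraction; objective: alternative.

-- Shared by both ports because both Pythons run the identical line
-- `attr, _, value = component.partition("="); (attr.strip().upper(), value.strip())`.
-- Hand port of str.partition: exact for the one-character separator "=" —
-- attr = chars before the first '=', value = chars after it ([] when absent).
def pvFinalize (s : List Char) : String × String :=
  let attr := s.takeWhile (fun c => c ≠ '=')
  let value := (s.dropWhile (fun c => c ≠ '=')).drop 1
  (String.ofList (PySem.Chars.upper (PySem.Chars.strip attr)),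
   String.ofList (PySem.Chars.strip value))

-- ===== PORT A =====
-- one step of A's `for c in dn` loop; state = (components, component, escape_sequence)
def pvStepA (st : List (String × String) × List Char × Bool) (c : Char) :
    List (String × String) × List Char × Bool :=
  let (components, component, esc) := st
  if c = '\\' then (components, component ++ [c], true)
  else if esc && c ≠ ' ' then (components, component ++ [c], false)
  else if c = ',' then
    -- `if "=" in component:` split, else fall through and append the comma
    if PySem.Chars.isIn ['='] component then (components ++ [pvFinalize component], [], esc)
    else (components, component ++ [c], esc)
  else (components, component ++ [c], esc)

def dn_to_components (dn : String) : List (String × String) :=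
  let st := dn.toList.foldl pvStepA ([], [], false)
  st.1 ++ [pvFinalize st.2.1]

-- ===== PORT B =====
-- hand port of Source B's `_escaped(prefix)` = `prefix.rstrip(' ').endswith('\\')`:
-- drop trailing spaces, then test whether the last char is a backslash — exact
def pvEscaped (pre : List Char) : Bool :=
  ((pre.reverse.dropWhile (fun c => c = ' ')).head? == some '\\')

-- one step of Source B's `for i, c in enumerate(dn)` loop; state = (parts, start).
-- Slices dn[:i] and dn[start:i] (with 0 ≤ start ≤ i ≤ len in every reachable state)
-- are ported as take/drop, exact on that range.
def pvStepB (s : List Char) (st : List (List Char) × Nat) (ic : Char × Nat) :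
    List (List Char) × Nat :=
  let (parts, start) := st
  let (c, i) := ic
  if c = ',' && !pvEscaped (s.take i) && PySem.Chars.isIn ['='] ((s.take i).drop start)
  then (parts ++ [(s.take i).drop start], i + 1)
  else (parts, start)

def dn_to_components_alt (dn : String) : List (String × String) :=
  let s := dn.toList
  -- `enumerate(dn)` ported as zipIdx (the index is the second component)
  let st := (s.zipIdx).foldl (pvStepB s) ([], 0)
  -- final `parts.append(dn[start:])` and the comprehension mapping partition/strip/upper
  (st.1 ++ [s.drop st.2]).map pvFinalize

-- ===== PRECONDITION & SPEC =====
def Spec_dn_to_components (dn : String) (out : List (String × String)) : Prop := out = dn_to_components_alt dn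
instance (dn : String) (out : List (String × String)) : Decidable (Spec_dn_to_components dn out) := by unfold Spec_dn_to_components; infer_instance

-- ===== CLAIM (what is proved, stated in full; the proofs are below) =====
def Claim_equal_dn_to_components : Prop := ∀ (dn : String), Dom_dn_to_components dn → Spec_dn_to_components dn (dn_to_components dn)

-- ===== LEMMAS AND PROOFS =====

-- the closed-form lookbehind predicate satisfies exactly A's escape-state transition
theorem pvEscaped_append (p : List Char) (c : Char) :
    pvEscaped (p ++ [c]) =
      if c = '\\' then true else if c = ' ' then pvEscaped p else false := by
  unfold pvEscaped
  by_cases h1 : c = '\\'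
  · simp [h1]
  · by_cases h2 : c = ' '
    · simp [h2]
    · simp [List.dropWhile, h2, h1]

theorem pvEscaped_nil : pvEscaped [] = false := by decide

-- loop invariant: after consuming the prefix p of s (= p ++ r), A's state is
-- (parts.map pvFinalize, s[start:|p|], pvEscaped p) for B's state (parts, start)
theorem pvLoop (s : List Char) : ∀ (r p : List Char) (parts : List (List Char)) (start : Nat),
    s = p ++ r → start ≤ p.length →
    r.foldl pvStepA (parts.map pvFinalize, p.drop start, pvEscaped p)
    = (fun st => (st.1.map pvFinalize, s.drop st.2, pvEscaped s))
        ((r.zipIdx p.length).foldl (pvStepB s) (parts, start)) := by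
  intro r
  induction r with
  | nil =>
    intro p parts start hs _
    subst hs; simp
  | cons c r ih =>
    intro p parts start hs hstart
    have htake : s.take p.length = p := by rw [hs]; simp
    simp only [List.foldl_cons, List.zipIdx_cons]
    have hs' : s = (p ++ [c]) ++ r := by rw [hs]; simp
    have hlen : (p ++ [c]).length = p.length + 1 := by simp
    by_cases h1 : c = '\\'
    · rw [show pvStepA (parts.map pvFinalize, p.drop start, pvEscaped p) c =
            (parts.map pvFinalize, p.drop start ++ [c], true) by simp [pvStepA, h1],
          show pvStepB s (parts, start) (c, p.length) = (parts, start) by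
            simp [pvStepB, h1],
          show p.drop start ++ [c] = (p ++ [c]).drop start from
            (List.drop_append_of_le_length hstart).symm,
          show (true : Bool) = pvEscaped (p ++ [c]) by rw [pvEscaped_append]; simp [h1]]
      rw [show r.zipIdx (p.length + 1) = r.zipIdx (p ++ [c]).length by rw [hlen]]
      exact ih (p ++ [c]) parts start hs' (by simp; omega)
    · by_cases h2 : pvEscaped p = true ∧ c ≠ ' '
      · rw [show pvStepA (parts.map pvFinalize, p.drop start, pvEscaped p) c =
              (parts.map pvFinalize, p.drop start ++ [c], false) by
                simp [pvStepA, h1, h2.1, h2.2],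
            show pvStepB s (parts, start) (c, p.length) = (parts, start) by
              by_cases h3 : c = ','
              · simp [pvStepB, h3, htake, h2.1]
              · simp [pvStepB, h3],
            show p.drop start ++ [c] = (p ++ [c]).drop start from
              (List.drop_append_of_le_length hstart).symm,
            show (false : Bool) = pvEscaped (p ++ [c]) by
              rw [pvEscaped_append]; simp [h1, h2.2]]
        rw [show r.zipIdx (p.length + 1) = r.zipIdx (p ++ [c]).length by rw [hlen]]
        exact ih (p ++ [c]) parts start hs' (by simp; omega)
      · have hesc' : pvEscaped p = true → c = ' ' := by
          intro h; by_contra hc; exact h2 ⟨h, hc⟩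
        have hguard : (pvEscaped p && decide (c ≠ ' ')) = false := by
          cases he : pvEscaped p
          · simp
          · simp [hesc' he]
        by_cases h3 : c = ','
        · have hesc : pvEscaped p = false := by
            cases he : pvEscaped p
            · rfl
            · exact absurd (hesc' he) (by subst h3; decide)
          by_cases h4 : PySem.Chars.isIn ['='] (p.drop start) = true
          · rw [show pvStepA (parts.map pvFinalize, p.drop start, pvEscaped p) c =
                  (parts.map pvFinalize ++ [pvFinalize (p.drop start)], [], pvEscaped p) by
                    simp [pvStepA, hesc, h3, h4],
                show pvStepB s (parts, start) (c, p.length) =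
                  (parts ++ [p.drop start], p.length + 1) by
                    simp [pvStepB, h3, htake, hesc, h4]]
            rw [show parts.map pvFinalize ++ [pvFinalize (p.drop start)] =
                  (parts ++ [p.drop start]).map pvFinalize by simp,
                show ([] : List Char) = (p ++ [c]).drop (p.length + 1) by simp,
                show pvEscaped p = pvEscaped (p ++ [c]) by
                  subst h3; rw [pvEscaped_append]; simpa using hesc]
            rw [show r.zipIdx (p.length + 1) = r.zipIdx (p ++ [c]).length by rw [hlen]]
            exact ih (p ++ [c]) (parts ++ [p.drop start]) (p.length + 1) hs' (by simp)
          · have h4' : PySem.Chars.isIn ['='] (p.drop start) = false := by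
              cases hb : PySem.Chars.isIn ['='] (p.drop start)
              · rfl
              · exact absurd hb h4
            rw [show pvStepA (parts.map pvFinalize, p.drop start, pvEscaped p) c =
                  (parts.map pvFinalize, p.drop start ++ [c], pvEscaped p) by
                    simp [pvStepA, hesc, h3, h4'],
                show pvStepB s (parts, start) (c, p.length) = (parts, start) by
                  simp [pvStepB, h3, htake, h4'],
                show p.drop start ++ [c] = (p ++ [c]).drop start from
                  (List.drop_append_of_le_length hstart).symm,
                show pvEscaped p = pvEscaped (p ++ [c]) by
                  subst h3; rw [pvEscaped_append]; simpa using hesc]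
            rw [show r.zipIdx (p.length + 1) = r.zipIdx (p ++ [c]).length by rw [hlen]]
            exact ih (p ++ [c]) parts start hs' (by simp; omega)
        · rw [show pvStepA (parts.map pvFinalize, p.drop start, pvEscaped p) c =
                (parts.map pvFinalize, p.drop start ++ [c], pvEscaped p) by
                  simp only [pvStepA, if_neg h1, hguard, Bool.false_eq_true, if_false,
                    if_neg h3],
              show pvStepB s (parts, start) (c, p.length) = (parts, start) by
                simp [pvStepB, h3],
              show p.drop start ++ [c] = (p ++ [c]).drop start from
                (List.drop_append_of_le_length hstart).symm,
              show pvEscaped p = pvEscaped (p ++ [c]) by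
                rw [pvEscaped_append]
                by_cases hsp : c = ' '
                · simp [hsp]
                · cases he : pvEscaped p
                  · simp [h1, hsp]
                  · exact absurd (hesc' he) hsp]
          rw [show r.zipIdx (p.length + 1) = r.zipIdx (p ++ [c]).length by rw [hlen]]
          exact ih (p ++ [c]) parts start hs' (by simp; omega)

-- ===== VERDICT (by name: the statement is the Claim_ definition above) =====
theorem dn_to_components_spec : Claim_equal_dn_to_components := by
  intro dn _
  unfold Spec_dn_to_components dn_to_components dn_to_components_alt
  have h := pvLoop dn.toList dn.toList [] [] 0 (by simp) (by simp)
  simp only [List.map_nil, List.drop_zero, List.length_nil, pvEscaped_nil] at h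
  rw [h]
  simp
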